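-- pv_equiv track=rewrite | github.com/LilBresss/esercizi_python | es1.py | competizione_con_meno_giudici
-- ===== SOURCE A (Python) =====
-- def competizione_con_meno_giudici(tupla_competizioni):
--     min = tupla_competizioni[0][3]
--     for (chef, piatto, punteggio, nGiudici) in tupla_competizioni:
--         if(nGiudici < min):
--             min = nGiudici
--
--     listaMin = []
--     for (chef, piatto, punteggio, nGiudici) in tupla_competizioni:
--         if(nGiudici == min):
--             listaMin.append((chef, piatto, punteggio, nGiudici))
--
--     return listaMin
-- ===== SOURCE B (Python) =====
-- def competizione_con_meno_giudici(tupla_competizioni):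
--     ordinate = sorted(tupla_competizioni, key=lambda t: t[3])
--     m = ordinate[0][3]
--     listaMin = []
--     for t in ordinate:
--         if t[3] != m:
--             break
--         listaMin.append(t)
--     return listaMin
-- ===== Notes on version B (the rewrite author's own statement) =====
-- stated objective: alternative
-- what changed: Replaces A's two scans (running-minimum loop, then a filter loop) by a stable sort on nGiudici followed by taking the leading run of equal-key tuples; sort stability preserves A's original relative order of the minimal tuples.
import Mathlib
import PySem

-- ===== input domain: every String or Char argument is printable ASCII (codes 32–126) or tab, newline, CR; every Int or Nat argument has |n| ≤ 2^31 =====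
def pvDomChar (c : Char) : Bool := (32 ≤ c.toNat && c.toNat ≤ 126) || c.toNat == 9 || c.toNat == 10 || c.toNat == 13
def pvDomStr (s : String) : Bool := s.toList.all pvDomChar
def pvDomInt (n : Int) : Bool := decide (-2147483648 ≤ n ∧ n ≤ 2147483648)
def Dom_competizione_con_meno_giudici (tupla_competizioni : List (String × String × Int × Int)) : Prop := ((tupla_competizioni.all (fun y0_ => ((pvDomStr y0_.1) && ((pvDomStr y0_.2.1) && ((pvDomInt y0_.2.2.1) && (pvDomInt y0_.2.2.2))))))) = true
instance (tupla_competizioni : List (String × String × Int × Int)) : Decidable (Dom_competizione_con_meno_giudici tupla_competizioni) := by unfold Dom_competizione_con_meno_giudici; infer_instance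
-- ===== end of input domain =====

-- B replaces A's two forward scans (running minimum, then filter) by a stable sort on
-- nGiudici followed by taking the leading run of equal-key tuples (stability keeps the
-- minimal tuples in A's original order); alternative algorithm, not claimed faster.
-- Pre_ excludes only the empty list, on which both Pythons raise (A: IndexError on [0][3]).
-- ===== PORT A =====
def competizione_con_meno_giudici (tupla_competizioni : List (String × String × Int × Int)) : List (String × String × Int × Int) :=
  match PySem.List.pyGet? tupla_competizioni 0 with
  | none => []   -- IndexError in Python; excluded by Pre_
  | some t0 =>
    let min := tupla_competizioni.foldl (fun m t => if t.2.2.2 < m then t.2.2.2 else m) t0.2.2.2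
    tupla_competizioni.foldl (fun acc t => if t.2.2.2 == min then acc ++ [t] else acc) []

-- ===== PORT B =====
-- the 'for t in ordinate: if t[3] != m: break; listaMin.append(t)' loop, as structural recursion
def pvTakeEq (m : Int) : List (String × String × Int × Int) → List (String × String × Int × Int)
  | [] => []
  | t :: rest => if t.2.2.2 ≠ m then [] else t :: pvTakeEq m rest

def competizione_con_meno_giudici_alt (tupla_competizioni : List (String × String × Int × Int)) : List (String × String × Int × Int) :=
  let ordinate := PySem.List.sorted tupla_competizioni (fun t => t.2.2.2) false
  match PySem.List.pyGet? ordinate 0 with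
  | none => []   -- IndexError in Python; excluded by Pre_
  | some h => pvTakeEq h.2.2.2 ordinate

-- ===== PRECONDITION & SPEC =====
def Pre_competizione_con_meno_giudici (tupla_competizioni : List (String × String × Int × Int)) : Prop := tupla_competizioni ≠ []
instance (tupla_competizioni : List (String × String × Int × Int)) : Decidable (Pre_competizione_con_meno_giudici tupla_competizioni) := by unfold Pre_competizione_con_meno_giudici; infer_instance
def pvWitness_competizione_con_meno_giudici : (List (String × String × Int × Int)) := [("anna", "pasta", 8, 3), ("bob", "pizza", 7, 2)]
def Spec_competizione_con_meno_giudici (tupla_competizioni : List (String × String × Int × Int)) (out : List (String × String × Int × Int)) : Prop := out = competizione_con_meno_giudici_alt tupla_competizioni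
instance (tupla_competizioni : List (String × String × Int × Int)) (out : List (String × String × Int × Int)) : Decidable (Spec_competizione_con_meno_giudici tupla_competizioni out) := by unfold Spec_competizione_con_meno_giudici; infer_instance

-- ===== CLAIM =====
def Claim_equal_competizione_con_meno_giudici : Prop := ∀ (tupla_competizioni : List (String × String × Int × Int)), Dom_competizione_con_meno_giudici tupla_competizioni → Pre_competizione_con_meno_giudici tupla_competizioni → Spec_competizione_con_meno_giudici tupla_competizioni (competizione_con_meno_giudici tupla_competizioni)

-- ===== LEMMAS AND PROOFS =====

-- abbreviations
def pvKey (t : String × String × Int × Int) : Int := t.2.2.2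
def pvIns (x : String × String × Int × Int) (acc : List (String × String × Int × Int)) : List (String × String × Int × Int) :=
  PySem.List.insertBy (fun a b => decide (pvKey a < pvKey b)) x acc

-- A's running-minimum fold
def pvMfold (l : List (String × String × Int × Int)) (m : Int) : Int :=
  l.foldl (fun m t => if t.2.2.2 < m then t.2.2.2 else m) m

lemma pvMfold_le (l : List (String × String × Int × Int)) (m : Int) :
    pvMfold l m ≤ m ∧ ∀ t ∈ l, pvMfold l m ≤ pvKey t := by
  induction l generalizing m with
  | nil => simp [pvMfold]
  | cons t l ih =>
    simp only [pvMfold, List.foldl_cons] at *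
    constructor
    · split
      · exact le_trans (ih _).1 (le_of_lt (by assumption))
      · exact (ih m).1
    · intro u hu
      rcases List.mem_cons.mp hu with h | h
      · subst h
        split
        · exact (ih _).1
        · exact le_trans (ih m).1 (by simp only [pvKey]; omega)
      · split
        · exact (ih _).2 u h
        · exact (ih m).2 u h

lemma pvMfold_mem (l : List (String × String × Int × Int)) (m : Int) :
    pvMfold l m = m ∨ ∃ t ∈ l, pvMfold l m = pvKey t := by
  induction l generalizing m with
  | nil => simp [pvMfold]
  | cons t l ih =>
    simp only [pvMfold, List.foldl_cons]
    split
    · rcases ih (pvKey t) with h | ⟨u, hu, h⟩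
      · exact Or.inr ⟨t, by simp, h⟩
      · exact Or.inr ⟨u, by simp [hu], h⟩
    · rcases ih m with h | ⟨u, hu, h⟩
      · exact Or.inl h
      · exact Or.inr ⟨u, by simp [hu], h⟩

-- insertBy splits its argument: result = a ++ x :: b with ys = a ++ b
lemma pv_insertBy_split (before : (String × String × Int × Int) → (String × String × Int × Int) → Bool)
    (x : String × String × Int × Int) (ys : List (String × String × Int × Int)) :
    ∃ a b, ys = a ++ b ∧ PySem.List.insertBy before x ys = a ++ x :: b := by
  induction ys with
  | nil => exact ⟨[], [], rfl, rfl⟩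
  | cons y ys ih =>
    by_cases h : before x y
    · exact ⟨[], y :: ys, rfl, by simp [PySem.List.insertBy, h]⟩
    · obtain ⟨a, b, he, hr⟩ := ih
      exact ⟨y :: a, b, by simp [he], by simp [PySem.List.insertBy, h, hr]⟩

-- pvIns preserves sortedness of the accumulator
lemma pvIns_pairwise (x : String × String × Int × Int) (acc : List (String × String × Int × Int))
    (h : acc.Pairwise (fun a b => pvKey a ≤ pvKey b)) :
    (pvIns x acc).Pairwise (fun a b => pvKey a ≤ pvKey b) := by
  induction acc with
  | nil => simp [pvIns, PySem.List.insertBy]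
  | cons y ys ih =>
    rcases List.pairwise_cons.mp h with ⟨hy, hys⟩
    by_cases hb : pvKey x < pvKey y
    · have h1 : pvIns x (y :: ys) = x :: y :: ys := by
        simp [pvIns, PySem.List.insertBy, hb]
      rw [h1]
      refine List.pairwise_cons.mpr ⟨?_, h⟩
      intro z hz
      rcases List.mem_cons.mp hz with h' | h'
      · subst h'; omega
      · exact le_trans (le_of_lt hb) (hy z h')
    · have : pvIns x (y :: ys) = y :: pvIns x ys := by
        simp [pvIns, PySem.List.insertBy, hb]
      rw [this]
      refine List.pairwise_cons.mpr ⟨?_, ih hys⟩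
      intro z hz
      rcases (PySem.List.mem_insertBy _ _ _ _).mp hz with h' | h'
      · subst h'; omega
      · exact hy z h'

-- filter of pvIns, key of x different from c: x is dropped
lemma pv_filter_ins_ne (c : Int) (x : String × String × Int × Int)
    (acc : List (String × String × Int × Int)) (hx : pvKey x ≠ c) :
    (pvIns x acc).filter (fun t => t.2.2.2 == c) = acc.filter (fun t => t.2.2.2 == c) := by
  obtain ⟨a, b, he, hr⟩ := pv_insertBy_split (fun a b => decide (pvKey a < pvKey b)) x acc
  rw [pvIns, hr, he]
  simp only [List.filter_append, List.filter_cons]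
  have : (x.2.2.2 == c) = false := by simpa [pvKey] using hx
  simp [this]

-- filter of pvIns, key of x equal to c, sorted acc: x lands after all other c-elements
lemma pv_filter_ins_eq (c : Int) (x : String × String × Int × Int)
    (acc : List (String × String × Int × Int)) (hx : pvKey x = c)
    (h : acc.Pairwise (fun a b => pvKey a ≤ pvKey b)) :
    (pvIns x acc).filter (fun t => t.2.2.2 == c) = acc.filter (fun t => t.2.2.2 == c) ++ [x] := by
  induction acc with
  | nil =>
    simp [pvIns, PySem.List.insertBy, show (x.2.2.2 == c) = true by simpa [pvKey] using hx]
  | cons y ys ih =>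
    rcases List.pairwise_cons.mp h with ⟨hy, hys⟩
    by_cases hb : pvKey x < pvKey y
    · have h1 : pvIns x (y :: ys) = x :: y :: ys := by
        simp [pvIns, PySem.List.insertBy, hb]
      have hnil : (y :: ys).filter (fun t => t.2.2.2 == c) = [] := by
        rw [List.filter_eq_nil_iff]
        intro z hz
        have : pvKey y ≤ pvKey z := by
          rcases List.mem_cons.mp hz with h' | h'
          · subst h'; exact le_refl _
          · exact hy z h'
        simp only [beq_iff_eq]
        show ¬ z.2.2.2 = c
        have : c < pvKey z := by omega
        simp only [pvKey] at this
        omega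
      rw [h1, List.filter_cons, hnil]
      simp [show (x.2.2.2 == c) = true by simpa [pvKey] using hx]
    · have h1 : pvIns x (y :: ys) = y :: pvIns x ys := by
        simp [pvIns, PySem.List.insertBy, hb]
      rw [h1, List.filter_cons, List.filter_cons, ih hys]
      by_cases hyc : (y.2.2.2 == c) = true <;> simp [hyc]

-- stability for a fixed key class, along the whole insertion sort
lemma pv_filter_foldl_ins (c : Int) (l acc : List (String × String × Int × Int))
    (h : acc.Pairwise (fun a b => pvKey a ≤ pvKey b)) :
    (l.foldl (fun acc x => pvIns x acc) acc).filter (fun t => t.2.2.2 == c)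
      = acc.filter (fun t => t.2.2.2 == c) ++ l.filter (fun t => t.2.2.2 == c) := by
  induction l generalizing acc with
  | nil => simp
  | cons x l ih =>
    simp only [List.foldl_cons]
    rw [ih (pvIns x acc) (pvIns_pairwise x acc h), List.filter_cons]
    by_cases hx : pvKey x = c
    · rw [pv_filter_ins_eq c x acc hx h]
      simp [show (x.2.2.2 == c) = true by simpa [pvKey] using hx]
    · rw [pv_filter_ins_ne c x acc hx]
      simp [show (x.2.2.2 == c) = false by simpa [pvKey] using hx]

-- sorted is stable on each key class
lemma pv_filter_sorted (c : Int) (l : List (String × String × Int × Int)) :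
    (PySem.List.sorted l (fun t => t.2.2.2) false).filter (fun t => t.2.2.2 == c)
      = l.filter (fun t => t.2.2.2 == c) := by
  rw [PySem.List.sorted_eq_foldl_insertBy l (fun t => t.2.2.2)]
  have := pv_filter_foldl_ins c l [] (by simp)
  simpa [pvIns, pvKey] using this

-- the break-loop equals filter on a sorted list whose keys are all ≥ m
lemma pvTakeEq_eq_filter (m : Int) (s : List (String × String × Int × Int))
    (hp : s.Pairwise (fun a b => pvKey a ≤ pvKey b)) (hm : ∀ t ∈ s, m ≤ pvKey t) :
    pvTakeEq m s = s.filter (fun t => t.2.2.2 == m) := by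
  induction s with
  | nil => simp [pvTakeEq]
  | cons t s ih =>
    rcases List.pairwise_cons.mp hp with ⟨ht, hs⟩
    by_cases h : t.2.2.2 = m
    · have h1 : pvTakeEq m (t :: s) = t :: pvTakeEq m s := by
        simp [pvTakeEq, h]
      rw [h1, List.filter_cons, ih hs (fun u hu => hm u (List.mem_cons_of_mem t hu))]
      simp [h]
    · have hgt : m < pvKey t := by
        have := hm t (List.mem_cons_self)
        simp only [pvKey] at *; omega
      have h1 : pvTakeEq m (t :: s) = [] := by
        simp [pvTakeEq, h]
      rw [h1, List.filter_cons]
      have hnil : s.filter (fun t => t.2.2.2 == m) = [] := by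
        rw [List.filter_eq_nil_iff]
        intro z hz
        have h1 : pvKey t ≤ pvKey z := ht z hz
        simp only [beq_iff_eq]
        show ¬ z.2.2.2 = m
        simp only [pvKey] at h1 hgt
        omega
      simp [show (t.2.2.2 == m) = false by simpa using h, hnil]

-- ===== VERDICT =====
theorem competizione_con_meno_giudici_spec : Claim_equal_competizione_con_meno_giudici := by
  intro l _ hpre
  unfold Spec_competizione_con_meno_giudici
  match l, hpre with
  | t0 :: rest, _ =>
    have hsne : PySem.List.sorted (t0 :: rest) (fun t => t.2.2.2) false ≠ [] := by
      rw [Ne, PySem.List.sorted_eq_nil_iff]; simp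
    obtain ⟨s0, stail, hs⟩ := List.exists_cons_of_ne_nil hsne
    unfold competizione_con_meno_giudici competizione_con_meno_giudici_alt
    rw [PySem.List.pyGet?_zero_cons]
    simp only [hs, PySem.List.pyGet?_zero_cons]
    rw [PySem.List.foldl_append_if_eq_filter, List.nil_append]
    -- A's minimum equals the key of the sorted head
    have hmin := pvMfold_le (t0 :: rest) t0.2.2.2
    have hhead := PySem.List.key_head_sorted_le (t0 :: rest) (fun t => t.2.2.2) hs
    have hs0mem : s0 ∈ (t0 :: rest) := by
      rw [← PySem.List.mem_sorted (t0 :: rest) (fun t => t.2.2.2) false s0, hs]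
      simp
    have hM : pvMfold (t0 :: rest) t0.2.2.2 = s0.2.2.2 := by
      have h1 : pvMfold (t0 :: rest) t0.2.2.2 ≤ s0.2.2.2 := hmin.2 s0 hs0mem
      have h2 : s0.2.2.2 ≤ pvMfold (t0 :: rest) t0.2.2.2 := by
        rcases pvMfold_mem (t0 :: rest) t0.2.2.2 with h | ⟨u, hu, h⟩
        · rw [h]; exact hhead t0 (by simp)
        · rw [h]; exact hhead u hu
      omega
    have hpair := PySem.List.sorted_pairwise (t0 :: rest) (fun t => t.2.2.2)
    rw [hs] at hpair
    rw [show List.foldl (fun m t => if t.2.2.2 < m then t.2.2.2 else m) t0.2.2.2 (t0 :: rest)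
        = pvMfold (t0 :: rest) t0.2.2.2 from rfl, hM]
    rw [pvTakeEq_eq_filter s0.2.2.2 (s0 :: stail) hpair
      (by intro u hu
          rw [← hs] at hu
          exact hhead u ((PySem.List.mem_sorted _ _ _ _).mp hu))]
    rw [← hs, pv_filter_sorted]
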